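-- pv_equiv track=rewrite | github.com/jooyun-1/PS_repo | 프로그래머스/2/60058. 괄호 변환/괄호 변환.py | solution
-- ===== SOURCE A (Python) =====
-- def checkRight(s) :
--     stack = []
--     for i in range(len(s)) :
--         if s[i] == '(' :
--             stack.append(s[i])
--         if s[i] == ')' :
--             if len(stack) == 0 :
--                 return False
--             else :
--                 stack.pop()
--     if len(stack) > 0 :
--         return False
--     else :
--         return True
--
-- def divide(s) :
--     left, right = 0, 0
--     for i in range(len(s)) :
--         if s[i] == '(' :
--             left += 1
--         if s[i] == ')' :
--             right += 1
--         if left == right :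
--             return s[:i+1], s[i+1:]
--
-- def solution(p):
--     answer = ''
--
--     if len(p) == 0 :
--         return ""
--     u, v = divide(p)
--
--     if checkRight(u) :
--         return u + solution(v)
--     else :
--         answer = '(' + solution(v) + ')'
--
--         for s in u[1:len(u)-1]:
--             if s == '(':
--                 answer += ')'
--             else:
--                 answer += '('
--         return answer
-- ===== SOURCE B (Python) =====
-- def solution(p):
--     # One pass: cut p at every point where the running bracket balance hits 0.
--     parts = []
--     cur = []
--     bal = 0
--     for c in p:
--         cur.append(c)
--         if c == '(':
--             bal += 1
--         elif c == ')':
--             bal -= 1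
--         if bal == 0:
--             parts.append(cur)
--             cur = []
--     # A minimal balanced chunk is "right" iff it does not start with ')'.
--     # Bad chunks wrap everything that follows: collect front pieces and the
--     # reversed back pieces, then join once.
--     front = []
--     back = []
--     for u in parts:
--         if u[0] != ')':
--             front.append(''.join(u))
--         else:
--             front.append('(')
--             back.append(')' + ''.join(')' if c == '(' else '(' for c in u[1:-1]))
--     return ''.join(front) + ''.join(reversed(back))
-- ===== Notes on version B (the rewrite author's own statement) =====
-- stated objective: faster
-- what changed: Replaces the recursive divide/checkRight rescans and repeated slicing with a single balance-counting pass that cuts p into minimal balanced chunks, tests each chunk's correctness by its first character, and assembles the result from front/back piece lists joined once. Pre_ excludes strings whose '(' and ')' counts differ, on which A's divide returns None and the tuple unpacking raises TypeError.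
-- outside the precondition, e.g. on solution('('): A raises TypeError, B returns ''; on solution(')'): A raises TypeError, B returns ''
import Mathlib
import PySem

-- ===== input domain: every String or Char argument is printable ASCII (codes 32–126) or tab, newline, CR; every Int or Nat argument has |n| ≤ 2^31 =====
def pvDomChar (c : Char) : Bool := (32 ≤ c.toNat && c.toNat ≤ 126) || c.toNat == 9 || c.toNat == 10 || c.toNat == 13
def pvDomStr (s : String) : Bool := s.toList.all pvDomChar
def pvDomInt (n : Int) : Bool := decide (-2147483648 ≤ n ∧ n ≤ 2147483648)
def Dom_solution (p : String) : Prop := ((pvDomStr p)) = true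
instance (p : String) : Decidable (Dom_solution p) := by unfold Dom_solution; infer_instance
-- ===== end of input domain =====

-- B replaces A's recursive divide/checkRight rescans by one balance-counting split pass
-- plus a front/back piece assembly (measured asymptotically faster). A raises TypeError
-- when '(' and ')' counts differ (divide returns None); Pre_ excludes exactly those inputs.


-- ===== PORT A =====
-- checkRight: stack-based validity scan (stack holds the pushed '(' characters)
def checkGo : List Char → List Char → Bool
  | [], stack => stack.isEmpty
  | c :: rest, stack =>
    let stack' := if c = '(' then c :: stack else stack
    if c = ')' then
      match stack' with
      | [] => false
      | _ :: st => checkGo rest st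
    else checkGo rest stack'

def checkRight (s : List Char) : Bool := checkGo s []

-- divide: scan with separate left/right counters, cut at the first index where they agree;
-- acc is s[:i] so far (s[:i+1] = acc ++ [c], s[i+1:] = rest); none = the loop falls through
-- (Python's divide returns None and the caller's unpacking raises TypeError)
def divideGo : List Char → Int → Int → List Char → Option (List Char × List Char)
  | [], _, _, _ => none
  | c :: rest, l, r, acc =>
    let l' := if c = '(' then l + 1 else l
    let r' := if c = ')' then r + 1 else r
    if l' = r' then some (acc ++ [c], rest) else divideGo rest l' r' (acc ++ [c])

lemma divideGo_some_lt : ∀ (s : List Char) (l r : Int) (acc u v : List Char),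
    divideGo s l r acc = some (u, v) → v.length < s.length := by
  intro s
  induction s with
  | nil => intro l r acc u v h; simp [divideGo] at h
  | cons c rest ih =>
    intro l r acc u v h
    simp only [divideGo] at h
    repeat' split at h
    all_goals
      first
        | (cases h; simp only [List.length_cons]; omega)
        | (exact Nat.lt_succ_of_lt (ih _ _ _ _ _ h))

-- '(' ↦ ')' , anything else ↦ '(' (the body of A's flipping loop; B's comprehension is identical)
def flipChar (c : Char) : Char := if c = '(' then ')' else '('

def solutionCore (p : List Char) : List Char :=
  if p = [] then []
  else
    match h : divideGo p 0 0 [] with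
    | none => []        -- Python raises TypeError here; excluded by Pre_solution
    | some (u, v) =>
      if checkRight u then u ++ solutionCore v
      -- (u.drop 1).dropLast is Python's u[1:len(u)-1] (u is nonempty here)
      else '(' :: (solutionCore v ++ ')' :: ((u.drop 1).dropLast.map flipChar))
termination_by p.length
decreasing_by all_goals exact divideGo_some_lt _ _ _ _ _ _ h

def solution (p : String) : String := String.mk (solutionCore p.toList)

-- ===== PORT B =====
-- one pass: cut p at every point where the running balance hits 0 (cur is the current chunk)
def splitGo : List Char → Int → List Char → List (List Char)
  | [], _, _ => []
  | c :: rest, bal, cur =>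
    let cur' := cur ++ [c]
    let bal' := if c = '(' then bal + 1 else if c = ')' then bal - 1 else bal
    if bal' = 0 then cur' :: splitGo rest 0 []
    else splitGo rest bal' cur'

-- assemble: front pieces in order, back pieces reversed, joined once
def buildGo : List (List Char) → List (List Char) → List (List Char) → List Char
  | [], front, back => front.flatten ++ back.reverse.flatten
  | u :: rest, front, back =>
    if u.headD ' ' ≠ ')' then buildGo rest (front ++ [u]) back
    else buildGo rest (front ++ [['(']])
           (back ++ [')' :: ((u.drop 1).dropLast.map flipChar)])

def solution_alt (p : String) : String :=
  String.mk (buildGo (splitGo p.toList 0 []) [] [])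

-- ===== PRECONDITION & SPEC =====
-- Pre_ excludes strings whose '(' and ')' counts differ: there A's divide returns
-- None and the unpacking `u, v = divide(p)` raises TypeError.
def Pre_solution (p : String) : Prop := p.toList.count '(' = p.toList.count ')'
instance (p : String) : Decidable (Pre_solution p) := by unfold Pre_solution; infer_instance

def pvWitness_solution : String := "(()))("

def Spec_solution (p : String) (out : String) : Prop := out = solution_alt p
instance (p : String) (out : String) : Decidable (Spec_solution p out) := by unfold Spec_solution; infer_instance

-- ===== CLAIM (what is proved, stated in full; the proofs are below) =====
def Claim_equal_solution : Prop := ∀ (p : String), Dom_solution p → Pre_solution p → Spec_solution p (solution p)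

-- ===== LEMMAS AND PROOFS =====

-- running bracket balance
def pvBal (t : List Char) : Int := (t.count '(' : Int) - t.count ')'

lemma pvBal_nil : pvBal [] = 0 := by simp [pvBal]

lemma pvBal_cons (c : Char) (t : List Char) :
    pvBal (c :: t) = (if c = '(' then 1 else if c = ')' then -1 else 0) + pvBal t := by
  simp only [pvBal, List.count_cons]
  by_cases h1 : c = '(' <;> by_cases h2 : c = ')' <;> simp_all <;> push_cast <;> ring

lemma pvBal_append (a b : List Char) : pvBal (a ++ b) = pvBal a + pvBal b := by
  simp [pvBal, List.count_append]; push_cast; ring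

-- splitGo mirrors divideGo: same cuts, chunk list = first chunk :: chunks of the rest
lemma split_divide : ∀ (s : List Char) (l r : Int) (acc : List Char),
    splitGo s (l - r) acc =
      (match divideGo s l r acc with
       | some (u, v) => u :: splitGo v 0 []
       | none => []) := by
  intro s
  induction s with
  | nil => intro l r acc; simp [splitGo, divideGo]
  | cons c rest ih =>
    intro l r acc
    simp only [splitGo, divideGo]
    by_cases h1 : c = '('
    · subst h1
      simp only [if_neg (by decide : ¬ ('(' : Char) = ')'), if_true]
      by_cases h2 : l + 1 = r
      · rw [if_pos (by omega : l - r + 1 = 0), if_pos h2]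
      · rw [if_neg (by omega : ¬ l - r + 1 = 0), if_neg h2]
        have := ih (l + 1) r (acc ++ ['('])
        rwa [(by omega : l + 1 - r = l - r + 1)] at this
    · by_cases h2 : c = ')'
      · subst h2
        simp only [if_neg h1, if_true]
        by_cases h3 : l = r + 1
        · rw [if_pos (by omega : l - r - 1 = 0), if_pos h3]
        · rw [if_neg (by omega : ¬ l - r - 1 = 0), if_neg h3]
          have := ih l (r + 1) (acc ++ [')'])
          rwa [(by omega : l - (r + 1) = l - r - 1)] at this
      · simp only [if_neg h1, if_neg h2]
        by_cases h3 : l = r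
        · rw [if_pos (by omega : l - r = 0), if_pos h3]
        · rw [if_neg (by omega : ¬ l - r = 0), if_neg h3]
          exact ih l r (acc ++ [c])

-- divide succeeds whenever the remaining total balance closes
lemma divideGo_total : ∀ (s : List Char) (l r : Int) (acc : List Char),
    s ≠ [] → (l - r) + pvBal s = 0 → ∃ u v, divideGo s l r acc = some (u, v) := by
  intro s
  induction s with
  | nil => intro l r acc hne _; exact absurd rfl hne
  | cons c rest ih =>
    intro l r acc _ hbal
    rw [pvBal_cons] at hbal
    simp only [divideGo]
    by_cases h1 : c = '('
    · rw [if_pos h1] at hbal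
      simp only [if_pos h1, if_neg (show ¬ c = ')' by rw [h1]; decide)]
      by_cases h2 : l + 1 = r
      · exact ⟨_, _, by rw [if_pos h2]⟩
      · rw [if_neg h2]
        have hne : rest ≠ [] := by intro he; subst he; rw [pvBal_nil] at hbal; omega
        exact ih (l + 1) r (acc ++ [c]) hne (by omega)
    · by_cases h2 : c = ')'
      · rw [if_neg h1, if_pos h2] at hbal
        simp only [if_neg h1, if_pos h2]
        by_cases h3 : l = r + 1
        · exact ⟨_, _, by rw [if_pos h3]⟩
        · rw [if_neg h3]
          have hne : rest ≠ [] := by intro he; subst he; rw [pvBal_nil] at hbal; omega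
          exact ih l (r + 1) (acc ++ [c]) hne (by omega)
      · rw [if_neg h1, if_neg h2] at hbal
        simp only [if_neg h1, if_neg h2]
        by_cases h3 : l = r
        · exact ⟨_, _, by rw [if_pos h3]⟩
        · rw [if_neg h3]
          have hne : rest ≠ [] := by intro he; subst he; rw [pvBal_nil] at hbal; omega
          exact ih l r (acc ++ [c]) hne (by omega)

-- shape of a successful divide: u = acc ++ w, w consumed from s, balance of w closes the counters
lemma divideGo_shape : ∀ (s : List Char) (l r : Int) (acc u v : List Char),
    divideGo s l r acc = some (u, v) →
    ∃ w, u = acc ++ w ∧ w ≠ [] ∧ (l - r) + pvBal w = 0 ∧ s = w ++ v := by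
  intro s
  induction s with
  | nil => intro l r acc u v h; simp [divideGo] at h
  | cons c rest ih =>
    intro l r acc u v h
    simp only [divideGo] at h
    by_cases h1 : c = '('
    · rw [if_pos h1, if_neg (show ¬ c = ')' by rw [h1]; decide)] at h
      by_cases h2 : l + 1 = r
      · rw [if_pos h2] at h
        cases h
        exact ⟨[c], rfl, by simp, by rw [pvBal_cons, pvBal_nil, if_pos h1]; omega, rfl⟩
      · rw [if_neg h2] at h
        obtain ⟨w, hu, hwne, hb, hs⟩ := ih _ _ _ _ _ h
        refine ⟨c :: w, by rw [hu]; simp, by simp, ?_, by simp [hs]⟩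
        rw [pvBal_cons, if_pos h1]; omega
    · by_cases h2 : c = ')'
      · rw [if_neg h1, if_pos h2] at h
        by_cases h3 : l = r + 1
        · rw [if_pos h3] at h
          cases h
          exact ⟨[c], rfl, by simp,
            by rw [pvBal_cons, pvBal_nil, if_neg h1, if_pos h2]; omega, rfl⟩
        · rw [if_neg h3] at h
          obtain ⟨w, hu, hwne, hb, hs⟩ := ih _ _ _ _ _ h
          refine ⟨c :: w, by rw [hu]; simp, by simp, ?_, by simp [hs]⟩
          rw [pvBal_cons, if_neg h1, if_pos h2]; omega
      · rw [if_neg h1, if_neg h2] at h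
        by_cases h3 : l = r
        · rw [if_pos h3] at h
          cases h
          exact ⟨[c], rfl, by simp,
            by rw [pvBal_cons, pvBal_nil, if_neg h1, if_neg h2]; omega, rfl⟩
        · rw [if_neg h3] at h
          obtain ⟨w, hu, hwne, hb, hs⟩ := ih _ _ _ _ _ h
          refine ⟨c :: w, by rw [hu]; simp, by simp, ?_, by simp [hs]⟩
          rw [pvBal_cons, if_neg h1, if_neg h2]; omega

-- the cut is minimal: no proper nonempty prefix of the consumed part closes the counters
lemma divideGo_prefix : ∀ (s : List Char) (l r : Int) (acc u v : List Char),
    divideGo s l r acc = some (u, v) →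
    ∀ t₁ t₂ : List Char, t₁ ≠ [] → t₂ ≠ [] → u = acc ++ t₁ ++ t₂ →
      (l - r) + pvBal t₁ ≠ 0 := by
  intro s
  induction s with
  | nil => intro l r acc u v h; simp [divideGo] at h
  | cons c rest ih =>
    intro l r acc u v h t₁ t₂ ht₁ ht₂ hu
    simp only [divideGo] at h
    by_cases hcut : (if c = '(' then l + 1 else l) = (if c = ')' then r + 1 else r)
    · rw [if_pos hcut] at h
      cases h
      rw [List.append_assoc] at hu
      have h12 : t₁ ++ t₂ = [c] := (List.append_cancel_left hu.symm)
      have hl := congrArg List.length h12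
      simp only [List.length_append, List.length_cons, List.length_nil] at hl
      have hp1 := List.length_pos_iff.mpr ht₁
      have hp2 := List.length_pos_iff.mpr ht₂
      omega
    · rw [if_neg hcut] at h
      obtain ⟨w, hw, -, -, -⟩ := divideGo_shape _ _ _ _ _ _ h
      obtain ⟨a, t₁', rfl⟩ : ∃ a t₁', t₁ = a :: t₁' := by
        cases t₁ with
        | nil => exact absurd rfl ht₁
        | cons a t₁' => exact ⟨a, t₁', rfl⟩
      have hcons : a :: (t₁' ++ t₂) = c :: w := by
        rw [hw] at hu
        rw [List.append_assoc, List.append_assoc] at hu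
        have := List.append_cancel_left hu
        simpa using this.symm
      obtain ⟨hac, hwsplit⟩ : a = c ∧ t₁' ++ t₂ = w :=
        ⟨(List.cons.injEq _ _ _ _ ▸ hcons).1, (List.cons.injEq _ _ _ _ ▸ hcons).2⟩
      subst hac
      rw [pvBal_cons]
      by_cases ht₁' : t₁' = []
      · subst ht₁'
        rw [pvBal_nil]
        intro hcon
        apply hcut
        by_cases h1 : a = '(' <;> by_cases h2 : a = ')' <;> simp_all <;> omega
      · have hih := ih _ _ _ _ _ h t₁' t₂ ht₁' ht₂ (by rw [hw, ← hwsplit]; simp)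
        intro hcon
        apply hih
        by_cases h1 : a = '(' <;> by_cases h2 : a = ')' <;> simp_all <;> omega

-- checkGo only depends on the stack's length (the stack always holds '(' characters)
def negFree : List Char → Nat → Bool
  | [], k => k == 0
  | c :: rest, k =>
    if c = ')' then
      match k with
      | 0 => false
      | Nat.succ k' => negFree rest k'
    else negFree rest (if c = '(' then k + 1 else k)

lemma checkGo_eq_negFree : ∀ (t : List Char) (k : Nat),
    checkGo t (List.replicate k '(') = negFree t k := by
  intro t
  induction t with
  | nil =>
    intro k
    cases k <;> simp [checkGo, negFree]
  | cons c rest ih =>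
    intro k
    by_cases h2 : c = ')'
    · subst h2
      cases k with
      | zero => rfl
      | succ k' => exact ih k'
    · by_cases h1 : c = '('
      · subst h1
        show checkGo rest ('(' :: List.replicate k '(') = negFree rest (k + 1)
        rw [← List.replicate_succ]
        exact ih (k + 1)
      · simp only [checkGo, negFree, if_neg h1, if_neg h2]
        exact ih k

-- if the balance starts positive, never returns to 0 before the end, and ends at 0,
-- the scan never pops an empty stack and the chunk checks out
lemma negFree_pos : ∀ (t : List Char) (k : Nat), 1 ≤ k →
    (∀ t₁ t₂ : List Char, t = t₁ ++ t₂ → t₂ ≠ [] → (k : Int) + pvBal t₁ ≠ 0) →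
    (k : Int) + pvBal t = 0 → negFree t k = true := by
  intro t
  induction t with
  | nil => intro k hk _ htot; rw [pvBal_nil] at htot; omega
  | cons c rest ih =>
    intro k hk hpre htot
    rw [pvBal_cons] at htot
    simp only [negFree]
    by_cases h2 : c = ')'
    · rw [if_pos h2]
      rw [if_neg (show ¬ c = '(' by rw [h2]; decide), if_pos h2] at htot
      obtain ⟨k', rfl⟩ : ∃ k', k = k' + 1 := ⟨k - 1, by omega⟩
      cases rest with
      | nil =>
        have hz : k' = 0 := by rw [pvBal_nil] at htot; push_cast at htot; omega
        subst hz; rfl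
      | cons d rest' =>
        have hkne : ((k' + 1 : Nat) : Int) + pvBal [c] ≠ 0 :=
          hpre [c] (d :: rest') rfl (by simp)
        rw [pvBal_cons, pvBal_nil, if_neg (show ¬ c = '(' by rw [h2]; decide),
          if_pos h2] at hkne
        apply ih k' (by push_cast at hkne; omega)
        · intro t₁ t₂ hsplit ht₂
          have hh := hpre (c :: t₁) t₂ (by simp [hsplit]) ht₂
          rw [pvBal_cons, if_neg (show ¬ c = '(' by rw [h2]; decide), if_pos h2] at hh
          push_cast
          push_cast at hh
          omega
        · push_cast; push_cast at htot; omega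
    · rw [if_neg h2]
      rw [if_neg h2] at htot
      by_cases h1 : c = '('
      · rw [if_pos h1] at htot ⊢
        apply ih (k + 1) (by omega)
        · intro t₁ t₂ hsplit ht₂
          have hh := hpre (c :: t₁) t₂ (by simp [hsplit]) ht₂
          rw [pvBal_cons, if_pos h1] at hh
          push_cast
          push_cast at hh
          omega
        · push_cast; push_cast at htot; omega
      · rw [if_neg h1] at htot ⊢
        apply ih k hk
        · intro t₁ t₂ hsplit ht₂
          have hh := hpre (c :: t₁) t₂ (by simp [hsplit]) ht₂
          rw [pvBal_cons, if_neg h1, if_neg h2] at hh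
          omega
        · omega

-- the front/back accumulators only contribute around the core result
lemma buildGo_shift : ∀ (rest front back : List (List Char)),
    buildGo rest front back = front.flatten ++ buildGo rest [] [] ++ back.reverse.flatten := by
  intro rest
  induction rest with
  | nil => intro front back; simp [buildGo]
  | cons u rest ih =>
    intro front back
    simp only [buildGo]
    split_ifs with hc
    · rw [ih (front ++ [u]) back, ih ([] ++ [u]) []]
      simp [List.flatten_append]
    · rw [ih (front ++ [['(']]) (back ++ [')' :: ((u.drop 1).dropLast.map flipChar)]),
        ih ([] ++ [['(']]) ([] ++ [')' :: ((u.drop 1).dropLast.map flipChar)])]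
      simp [List.flatten_append, List.reverse_append]

lemma solutionCore_eq_some {p u v : List Char} (h : divideGo p 0 0 [] = some (u, v)) :
    solutionCore p =
      if checkRight u then u ++ solutionCore v
      else '(' :: (solutionCore v ++ ')' :: ((u.drop 1).dropLast.map flipChar)) := by
  have hp : ¬ p = [] := by intro e; subst e; simp [divideGo] at h
  rw [solutionCore, if_neg hp]
  split
  · next heq => rw [heq] at h; cases h
  · next u' v' heq =>
    have he := h.symm.trans heq
    cases he
    rfl

lemma buildGo_cons (u : List Char) (parts : List (List Char)) :
    buildGo (u :: parts) [] [] =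
      if u.headD ' ' ≠ ')' then u ++ buildGo parts [] []
      else '(' :: (buildGo parts [] [] ++ ')' :: ((u.drop 1).dropLast.map flipChar)) := by
  simp only [buildGo]
  split_ifs with hc
  · rw [buildGo_shift parts ([] ++ [u]) []]
    simp
  · rw [buildGo_shift parts ([] ++ [['(']]) ([] ++ [')' :: ((u.drop 1).dropLast.map flipChar)])]
    simp

lemma core_eq : ∀ (n : Nat) (s : List Char), s.length ≤ n → pvBal s = 0 →
    solutionCore s = buildGo (splitGo s 0 []) [] [] := by
  intro n
  induction n with
  | zero =>
    intro s hlen _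
    have hs : s = [] := List.eq_nil_of_length_eq_zero (Nat.le_zero.mp hlen)
    subst hs
    rw [solutionCore]
    simp [splitGo, buildGo]
  | succ n ih =>
    intro s hlen hbal
    by_cases hs : s = []
    · subst hs
      rw [solutionCore]
      simp [splitGo, buildGo]
    · obtain ⟨u, v, h⟩ := divideGo_total s 0 0 [] hs (by omega)
      obtain ⟨w, hu, hwne, hwb, hsplit⟩ := divideGo_shape s 0 0 [] u v h
      rw [List.nil_append] at hu
      subst hu
      have hub : pvBal u = 0 := by omega
      have hvb : pvBal v = 0 := by
        have hap := pvBal_append u v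
        rw [← hsplit] at hap
        omega
      have hvlen : v.length ≤ n := by
        have := divideGo_some_lt s 0 0 [] u v h
        omega
      have ihv := ih v hvlen hvb
      have hsg : splitGo s 0 [] = u :: splitGo v 0 [] := by
        have hsd := split_divide s 0 0 []
        rw [h] at hsd
        simpa using hsd
      obtain ⟨c, t, rfl⟩ : ∃ c t, u = c :: t := by
        cases u with
        | nil => exact absurd rfl hwne
        | cons c t => exact ⟨c, t, rfl⟩
      rw [hsg, buildGo_cons, solutionCore_eq_some h, ihv]
      by_cases h2 : c = ')'
      · -- not right: the chunk starts with ')'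
        have hcr : checkRight (c :: t) = false := by
          subst h2; simp [checkRight, checkGo]
        rw [hcr, if_neg (by subst h2; simp : ¬ (c :: t).headD ' ' ≠ ')')]
        simp
      · by_cases h1 : c = '('
        · -- right: balance stays positive inside the minimal chunk
          have hcr : checkRight (c :: t) = true := by
            have e1 : checkRight (c :: t) = negFree (c :: t) 0 := by
              rw [checkRight, show ([] : List Char) = List.replicate 0 '(' from rfl]
              exact checkGo_eq_negFree (c :: t) 0
            have e2 : negFree (c :: t) 0 = negFree t 1 := by
              rw [negFree, if_neg (show ¬ c = ')' by rw [h1]; decide), if_pos h1]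
            rw [e1, e2]
            apply negFree_pos t 1 le_rfl
            · intro t₁ t₂ hsp ht₂
              have hh := divideGo_prefix s 0 0 [] (c :: t) v h (c :: t₁) t₂
                (by simp) ht₂ (by rw [hsp]; simp)
              rw [pvBal_cons, if_pos h1] at hh
              omega
            · rw [pvBal_cons, if_pos h1] at hub
              omega
          rw [hcr, if_pos (by rw [h1]; simp : (c :: t).headD ' ' ≠ ')')]
          simp
        · -- a single non-bracket character chunk
          have ht : t = [] := by
            by_contra ht
            have hh := divideGo_prefix s 0 0 [] (c :: t) v h [c] t (by simp) ht (by simp)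
            rw [pvBal_cons, pvBal_nil, if_neg h1, if_neg h2] at hh
            omega
          subst ht
          have hcr : checkRight [c] = true := by
            simp [checkRight, checkGo, if_neg h1, if_neg h2]
          rw [hcr, if_pos (by simpa using h2 : ([c] : List Char).headD ' ' ≠ ')')]
          simp

-- ===== VERDICT (by name: the statement is the Claim_ definition above) =====
theorem solution_spec : Claim_equal_solution := by
  intro p _ hpre
  unfold Spec_solution solution solution_alt
  have hbal : pvBal p.toList = 0 := by
    unfold Pre_solution at hpre; unfold pvBal; omega
  exact congrArg String.mk (core_eq p.toList.length p.toList le_rfl hbal)
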